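-- pv_equiv track=rewrite | github.com/AjnasNB/CodeSlaying | a.py | editorMiss
-- ===== SOURCE A (Python) =====
-- def editorMiss(text):
--
--     count=0
--
--     for ch in text:
--
--         if((ch >= 'a' and ch <= 'z') or (ch >= 'A' and ch <= 'Z')):
--
--             pass
--
--         elif(ch >= '0' and ch <= '9'):
--
--             pass
--
--         else:
--
--             if(ch==" "):
--
--                 pass
--
--             else:
--
--                 count=count+1
--
--     return count
-- ===== SOURCE B (Python) =====
-- import re
--
-- def editorMiss(text):
--     # count the complement: total length minus the characters in [a-zA-Z0-9 ]
--     return len(text) - len(re.findall(r'[a-zA-Z0-9 ]', text))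
-- ===== Notes on version B (the rewrite author's own statement) =====
-- stated objective: idiomatic
-- what changed: B counts by complement: it delegates per-character classification to a regex character class and returns len(text) minus the number of allowed characters, instead of A's manual ordinal-range branching loop with an accumulator.
import Mathlib
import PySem

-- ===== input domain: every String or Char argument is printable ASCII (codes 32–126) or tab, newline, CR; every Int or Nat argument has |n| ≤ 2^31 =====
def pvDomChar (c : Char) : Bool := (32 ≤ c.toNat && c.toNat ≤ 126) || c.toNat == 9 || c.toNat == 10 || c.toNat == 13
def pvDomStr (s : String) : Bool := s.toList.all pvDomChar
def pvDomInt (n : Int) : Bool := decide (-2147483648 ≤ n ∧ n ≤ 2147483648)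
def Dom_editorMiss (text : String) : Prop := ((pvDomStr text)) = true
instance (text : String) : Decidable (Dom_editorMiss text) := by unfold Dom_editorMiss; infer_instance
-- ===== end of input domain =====

-- B counts by complement via a regex character class (len(text) - matches of [a-zA-Z0-9 ]) instead of A's branching accumulator loop; same value, same cost.

-- ===== PORT A =====
-- literal transliteration of A's loop: branch order and pass-branches preserved
def editorMiss (text : String) : Int :=
  text.toList.foldl
    (fun count ch =>
      if ('a' ≤ ch && ch ≤ 'z') || ('A' ≤ ch && ch ≤ 'Z') then count
      else if '0' ≤ ch && ch ≤ '9' then count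
      else if ch = ' ' then count
      else count + 1)
    0

-- ===== PORT B =====
-- the regex character class [a-zA-Z0-9 ] ported as a per-character predicate;
-- len(re.findall(...)) = length of the filtered character list
def pvAllowed (c : Char) : Bool :=
  ('a' ≤ c && c ≤ 'z') || ('A' ≤ c && c ≤ 'Z') || ('0' ≤ c && c ≤ '9') || c = ' '

def editorMiss_alt (text : String) : Int :=
  (text.toList.length : Int) - ((text.toList.filter pvAllowed).length : Int)

-- ===== PRECONDITION & SPEC =====
def Spec_editorMiss (text : String) (out : Int) : Prop := out = editorMiss_alt text
instance (text : String) (out : Int) : Decidable (Spec_editorMiss text out) := by unfold Spec_editorMiss; infer_instance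

-- ===== CLAIM (what is proved, stated in full; the proofs are below) =====
def Claim_equal_editorMiss : Prop := ∀ (text : String), Dom_editorMiss text → Spec_editorMiss text (editorMiss text)

-- ===== LEMMAS AND PROOFS =====
theorem editorMiss_step (cnt : Int) (c : Char) :
    (if ('a' ≤ c && c ≤ 'z') || ('A' ≤ c && c ≤ 'Z') then cnt
     else if '0' ≤ c && c ≤ '9' then cnt
     else if c = ' ' then cnt
     else cnt + 1)
    = if pvAllowed c then cnt else cnt + 1 := by
  simp only [pvAllowed]
  by_cases h1 : (('a' ≤ c && c ≤ 'z') || ('A' ≤ c && c ≤ 'Z')) = true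
  · simp [h1]
  · by_cases h2 : ('0' ≤ c && c ≤ '9') = true
    · simp [h1, h2]
    · by_cases h3 : c = ' ' <;> simp [h1, h2, h3]

theorem editorMiss_go (l : List Char) (cnt : Int) :
    l.foldl
      (fun count ch =>
        if ('a' ≤ ch && ch ≤ 'z') || ('A' ≤ ch && ch ≤ 'Z') then count
        else if '0' ≤ ch && ch ≤ '9' then count
        else if ch = ' ' then count
        else count + 1)
      cnt
    = cnt + (l.length : Int) - ((l.filter pvAllowed).length : Int) := by
  induction l generalizing cnt with
  | nil => simp
  | cons c t ih =>
    rw [List.foldl_cons, editorMiss_step, List.filter_cons]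
    by_cases h : pvAllowed c = true
    · rw [if_pos h, if_pos h, ih]; simp only [List.length_cons]; push_cast; ring
    · rw [if_neg h, if_neg h, ih]; simp only [List.length_cons]; push_cast; ring

-- ===== VERDICT (by name: the statement is the Claim_ definition above) =====
theorem editorMiss_spec : Claim_equal_editorMiss := by
  intro text _
  unfold Spec_editorMiss editorMiss editorMiss_alt
  rw [editorMiss_go]
  ring
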